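-- pv_equiv track=rewrite | github.com/Hanjin-Choi/Algorithm | 프로그래머스/1/42840. 모의고사/모의고사.py | solution
-- ===== SOURCE A (Python) =====
-- def solution(answers):
--     answer = []
--     p1 =[1,2,3,4,5]
--     p2 = [2,1,2,3,2,4,2,5]
--     p3 = [3,3,1,1,2,2,4,4,5,5]
--     res=[0,0,0]
--
--
--     for i in range(len(answers)):
--         if answers[i]==p1[i%5]:
--             res[0]+=1
--         if answers[i]==p2[i%8]:
--             res[1]+=1
--         if answers[i]==p3[i%10]:
--             res[2]+=1
--     m=max(res)
--     for i in range(3):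
--         if res[i]==m:
--             answer.append(i+1)
--     return answer
-- ===== SOURCE B (Python) =====
-- def solution(answers):
--     patterns = [[1, 2, 3, 4, 5],
--                 [2, 1, 2, 3, 2, 4, 2, 5],
--                 [3, 3, 1, 1, 2, 2, 4, 4, 5, 5]]
--     # column-major counting: for each pattern slot j, count how often the slot's
--     # answer occurs among the submitted answers at positions j, j+L, j+2L, ...
--     scores = [sum(answers[j::len(p)].count(v) for j, v in enumerate(p))
--               for p in patterns]
--     best = max(scores)
--     return [i + 1 for i, s in enumerate(scores) if s == best]
-- ===== Notes on version B (the rewrite author's own statement) =====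
-- stated objective: alternative
-- what changed: Replaces A's single row-major pass (one modulo-indexed loop comparing every answer to all three patterns and incrementing three counters) by a column-major counting scheme: for each pattern and each pattern slot j, the score contribution is list.count of the slot's value over the strided slice answers[j::len(p)], so no per-element equality loop or position counter remains; the result is then an enumerate comprehension over the three scores.
import Mathlib
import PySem

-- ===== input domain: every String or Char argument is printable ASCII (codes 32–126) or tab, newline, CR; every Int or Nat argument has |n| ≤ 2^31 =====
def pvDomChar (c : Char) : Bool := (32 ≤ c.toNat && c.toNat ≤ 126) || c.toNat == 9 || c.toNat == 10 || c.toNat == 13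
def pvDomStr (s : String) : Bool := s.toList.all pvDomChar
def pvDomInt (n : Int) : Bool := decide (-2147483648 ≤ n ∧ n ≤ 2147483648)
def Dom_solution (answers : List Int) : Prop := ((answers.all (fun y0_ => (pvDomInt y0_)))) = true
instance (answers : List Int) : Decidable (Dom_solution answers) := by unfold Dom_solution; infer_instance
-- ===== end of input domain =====

-- B replaces A's row-major modulo-indexed counting pass by column-major counting: per pattern
-- slot j, list.count of the slot's value over the strided slice answers[j::len(p)] (alternative
-- decomposition, same linear cost).

-- ===== PORT A =====
def solution (answers : List Int) : List Int :=
  let p1 : List Int := [1, 2, 3, 4, 5]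
  let p2 : List Int := [2, 1, 2, 3, 2, 4, 2, 5]
  let p3 : List Int := [3, 3, 1, 1, 2, 2, 4, 4, 5, 5]
  -- res = [0,0,0], mutated only at the fixed indices 0,1,2 → a triple of counters
  let res : Int × Int × Int :=
    (PySem.List.pyRange 0 (answers.length : Int) 1).foldl
      (fun (r : Int × Int × Int) i =>
        let r0 := if PySem.List.pyGetD answers i 0 = PySem.List.pyGetD p1 (PySem.Int.mod i 5) 0 then r.1 + 1 else r.1
        let r1 := if PySem.List.pyGetD answers i 0 = PySem.List.pyGetD p2 (PySem.Int.mod i 8) 0 then r.2.1 + 1 else r.2.1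
        let r2 := if PySem.List.pyGetD answers i 0 = PySem.List.pyGetD p3 (PySem.Int.mod i 10) 0 then r.2.2 + 1 else r.2.2
        (r0, r1, r2))
      (0, 0, 0)
  -- m = max(res) over the three counters
  let m := max (max res.1 res.2.1) res.2.2
  (PySem.List.pyRange 0 3 1).foldl
    (fun ans i =>
      if (if i = 0 then res.1 else if i = 1 then res.2.1 else res.2.2) = m then ans ++ [i + 1] else ans)
    []

-- ===== PORT B =====
-- sum(answers[j::len(p)].count(v) for j, v in enumerate(p)); Python slicing with step
-- len(p) > 0 never raises, so slice? is always some and .getD [] is never taken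
def altScore (p xs : List Int) : Int :=
  ((PySem.List.enumerate p).map (fun jv =>
      ((((PySem.List.slice? xs (some jv.1) none (p.length : Int)).getD []).count jv.2 : Nat) : Int))).sum

def solution_alt (answers : List Int) : List Int :=
  let patterns : List (List Int) := [[1, 2, 3, 4, 5], [2, 1, 2, 3, 2, 4, 2, 5], [3, 3, 1, 1, 2, 2, 4, 4, 5, 5]]
  let scores := patterns.map (fun p => altScore p answers)
  -- best = max(scores); scores always has three elements, so Python's max never raises
  let best := (PySem.List.max? scores (fun x => x)).getD 0
  (PySem.List.enumerate scores).foldl (fun acc is => if is.2 = best then acc ++ [is.1 + 1] else acc) []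

-- ===== PRECONDITION & SPEC =====
def Spec_solution (answers : List Int) (out : List Int) : Prop := out = solution_alt answers
instance (answers : List Int) (out : List Int) : Decidable (Spec_solution answers out) := by unfold Spec_solution; infer_instance

-- ===== CLAIM (what is proved, stated in full; the proofs are below) =====
def Claim_equal_solution : Prop := ∀ (answers : List Int), Dom_solution answers → Spec_solution answers (solution answers)

-- ===== LEMMAS AND PROOFS =====

-- number of positions i < n with xs[i] = p[i % len(p)] — the score of pattern p on the first n answers
def cntN (p xs : List Int) (n : Nat) : Int :=
  ((List.range n).countP (fun i => xs.getD i 0 == p.getD (i % p.length) 0) : Nat)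

-- number of k with j + L*k < n: length of the strided slice xs[j::L]
def cCount (n L j : Nat) : Nat := (n - j + L - 1) / L

-- xs[j::L] is the list of xs[j + L*k] for k < cCount
theorem slice_stride (xs : List Int) (L j : Nat) (hL : 0 < L) :
    PySem.List.slice? xs (some (j : Int)) none (L : Int) =
      some ((List.range (cCount xs.length L j)).map (fun k => xs.getD (j + L * k) 0)) := by
  have h0 : ¬ ((L : Int) = 0) := by omega
  have h1 : ¬ ((L : Int) < 0) := by omega
  have h2 : ¬ ((j : Int) < 0) := by omega
  simp only [PySem.List.slice?, PySem.List.sliceIndices, if_neg h0, if_neg h1, if_neg h2,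
    if_pos (by omega : (0:Int) < (L:Int))]
  by_cases hj : j < xs.length
  · have hmin : min (j : Int) (xs.length : Int) = (j : Int) := by omega
    have hlt : ((j:Int) < (xs.length:Int)) := by omega
    rw [hmin, if_pos hlt]
    have hcnt : (((xs.length : Int) - (j:Int) + (L:Int) - 1) / (L:Int)).toNat = cCount xs.length L j := by
      have : ((xs.length : Int) - (j:Int) + (L:Int) - 1) = ((xs.length - j + L - 1 : Nat) : Int) := by
        omega
      rw [this, cCount, ← Int.natCast_div, Int.toNat_natCast]
    rw [hcnt]
    congr 1
    have hb : ∀ k ∈ List.range (cCount xs.length L j),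
        (fun x => xs[((j:Int) + (L:Int) * (x:Int)).toNat]?) k = some (xs.getD (j + L * k) 0) := by
      intro k hk
      rw [List.mem_range] at hk
      have hkd : (k + 1) * L ≤ xs.length - j + L - 1 := by
        rw [cCount] at hk
        exact (Nat.le_div_iff_mul_le hL).mp hk
      have hkd' : L * k + L ≤ xs.length - j + L - 1 := by
        have h : (k + 1) * L = L * k + L := by ring
        omega
      have hidx : j + L * k < xs.length := by omega
      have ht : ((j:Int) + (L:Int) * (k:Int)).toNat = j + L * k := by omega
      show xs[((j:Int) + (L:Int) * (k:Int)).toNat]? = some (xs.getD (j + L * k) 0)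
      rw [ht, List.getElem?_eq_getElem hidx, List.getD_eq_getElem xs 0 hidx]
    rw [List.filterMap_congr hb]
    simp
  · have hmin : min (j : Int) (xs.length : Int) = (xs.length : Int) := by omega
    rw [hmin, if_neg (by omega)]
    have : cCount xs.length L j = 0 := by
      rw [cCount]
      have : xs.length - j = 0 := by omega
      rw [this]
      exact Nat.div_eq_of_lt (by omega)
    rw [this]
    simp

theorem cCount_succ (n L j : Nat) (hL : 0 < L) (hj : j < L) :
    cCount (n+1) L j = cCount n L j + (if j = n % L then 1 else 0) := by
  unfold cCount
  rcases Nat.lt_or_ge n j with h | h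
  · have h1 : n + 1 - j + L - 1 = L - 1 := by omega
    have h2 : n - j + L - 1 = L - 1 := by omega
    have hne : ¬ (j = n % L) := by
      intro he; have := Nat.mod_le n L; omega
    rw [h1, h2, if_neg hne, Nat.div_eq_of_lt (by omega)]
  · have hd := Nat.div_add_mod (n - j) L
    set d := n - j with hdd
    set q := d / L with hq
    set r := d % L with hr
    have hrL : r < L := Nat.mod_lt _ hL
    have hnm : n % L = (r + j) % L := by
      conv_lhs => rw [show n = L * q + (r + j) by omega]
      rw [Nat.mul_add_mod]
    have hlhs : (n + 1 - j + L - 1) / L = q + 1 := by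
      rw [show n + 1 - j + L - 1 = L * q + (r + L) by omega, Nat.mul_add_div hL,
        Nat.div_eq_of_lt_le (by omega : 1 * L ≤ r + L) (by omega : r + L < (1 + 1) * L)]
    rcases Nat.eq_zero_or_pos r with hr0 | hr0
    · have hite : (if j = n % L then 1 else 0) = 1 := by
        rw [if_pos]; rw [hnm, hr0, Nat.zero_add, Nat.mod_eq_of_lt hj]
      rw [hlhs, hite, show d + L - 1 = L * q + (L - 1) by omega, Nat.mul_add_div hL,
        Nat.div_eq_of_lt (by omega)]
    · have hite : (if j = n % L then 1 else 0) = 0 := by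
        rw [if_neg]
        intro he
        rcases Nat.lt_or_ge (r + j) L with hc | hc
        · rw [hnm, Nat.mod_eq_of_lt hc] at he; omega
        · have : (r + j) % L = r + j - L := by
            rw [Nat.mod_eq_sub_mod hc, Nat.mod_eq_of_lt (by omega)]
          rw [hnm, this] at he; omega
      rw [hlhs, hite, show d + L - 1 = L * q + (r + L - 1) by omega, Nat.mul_add_div hL,
        Nat.div_eq_of_lt_le (by omega : 1 * L ≤ r + L - 1) (by omega : r + L - 1 < (1 + 1) * L)]

theorem cCount_mod (n L : Nat) (hL : 0 < L) : cCount n L (n % L) = n / L := by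
  unfold cCount
  have hd := Nat.div_add_mod n L
  set q := n / L with hq
  set r := n % L with hr
  have hm : r < L := Nat.mod_lt _ hL
  rw [show n - r + L - 1 = L * q + (L - 1) by omega, Nat.mul_add_div hL,
    Nat.div_eq_of_lt (by omega)]
  omega

-- residues j < L partition the positions below n: summing the per-residue matches gives the total
theorem partitionResidues (f : Nat → Bool) (L : Nat) (hL : 0 < L) (n : Nat) :
    ∑ j ∈ Finset.range L, (List.range (cCount n L j)).countP (fun k => f (j + L * k))
      = (List.range n).countP f := by
  induction n with
  | zero =>
    have hz : ∀ j, cCount 0 L j = 0 := by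
      intro j; unfold cCount
      rw [show 0 - j + L - 1 = L - 1 by omega]
      exact Nat.div_eq_of_lt (by omega)
    simp [hz]
  | succ n ih =>
    rw [List.range_succ, List.countP_append]
    have hstep : ∀ j ∈ Finset.range L,
        (List.range (cCount (n+1) L j)).countP (fun k => f (j + L * k))
          = (List.range (cCount n L j)).countP (fun k => f (j + L * k))
            + (if j = n % L then (if f n then 1 else 0) else 0) := by
      intro j hj
      rw [Finset.mem_range] at hj
      rw [cCount_succ n L j hL hj]
      by_cases hjm : j = n % L
      · rw [if_pos hjm, if_pos hjm, List.range_succ, List.countP_append]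
        congr 1
        subst hjm
        rw [cCount_mod n L hL]
        simp [List.countP_cons, Nat.mod_add_div n L]
      · rw [if_neg hjm, if_neg hjm, Nat.add_zero, Nat.add_zero]
    rw [Finset.sum_congr rfl hstep, Finset.sum_add_distrib, ih]
    congr 1
    rw [Finset.sum_ite_eq' (Finset.range L) (n % L)]
    rw [if_pos (Finset.mem_range.mpr (Nat.mod_lt _ hL))]
    simp [List.countP_cons]

-- B's per-pattern score equals the number of matching positions
theorem altScore_eq_cntN (p xs : List Int) (hp : p ≠ []) :
    altScore p xs = cntN p xs xs.length := by
  have hL : 0 < p.length := List.length_pos_iff.mpr hp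
  unfold altScore
  rw [PySem.List.enumerate_eq_map_pyRange p (0:Int), PySem.List.len, PySem.List.pyRange_zero_natCast,
    List.map_map, List.map_map]
  have hmap : ∀ j ∈ List.range p.length,
      (((fun jv : Int × Int =>
          ((((PySem.List.slice? xs (some jv.1) none (p.length : Int)).getD []).count jv.2 : Nat) : Int))
        ∘ (fun j : Int => (j, PySem.List.pyGetD p j 0))) ∘ (fun k : Nat => (k : Int))) j
      = (((List.range (cCount xs.length p.length j)).countP
            (fun k => xs.getD (j + p.length * k) 0 == p.getD j 0) : Nat) : Int) := by
    intro j hj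
    rw [List.mem_range] at hj
    simp only [Function.comp_apply]
    rw [slice_stride xs p.length j hL, Option.getD_some, PySem.List.pyGetD_natCast,
      List.count_eq_countP, List.countP_map]
    rfl
  rw [List.map_congr_left hmap]
  have hsum : ((List.range p.length).map (fun j =>
      (((List.range (cCount xs.length p.length j)).countP
          (fun k => xs.getD (j + p.length * k) 0 == p.getD j 0) : Nat) : Int))).sum
    = ((∑ j ∈ Finset.range p.length, (List.range (cCount xs.length p.length j)).countP
          (fun k => xs.getD (j + p.length * k) 0 == p.getD j 0) : Nat) : Int) := by
    rw [Nat.cast_sum]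
    rfl
  rw [hsum]
  unfold cntN
  congr 1
  rw [← partitionResidues (fun i => xs.getD i 0 == p.getD (i % p.length) 0) p.length hL xs.length]
  apply Finset.sum_congr rfl
  intro j hj
  rw [Finset.mem_range] at hj
  apply List.countP_congr
  intro k _
  simp only [Nat.add_mul_mod_self_left, Nat.mod_eq_of_lt hj]

-- one counting step: the Prop-valued if of A's loop vs the Bool-valued count of cntN
theorem step_count (a b : Int) (c : Nat) :
    (if a = b then (c : Int) + 1 else (c : Int)) = ((c + if (a == b) = true then 1 else 0 : Nat) : Int) := by
  by_cases h : a = b <;> simp [h]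

-- A's counting loop computes the three pattern scores
set_option maxHeartbeats 1000000 in
theorem loopA (xs : List Int) (m : Nat) :
    (PySem.List.pyRange 0 (m : Int) 1).foldl
      (fun (r : Int × Int × Int) i =>
        let r0 := if PySem.List.pyGetD xs i 0 = PySem.List.pyGetD [1, 2, 3, 4, 5] (PySem.Int.mod i 5) 0 then r.1 + 1 else r.1
        let r1 := if PySem.List.pyGetD xs i 0 = PySem.List.pyGetD [2, 1, 2, 3, 2, 4, 2, 5] (PySem.Int.mod i 8) 0 then r.2.1 + 1 else r.2.1
        let r2 := if PySem.List.pyGetD xs i 0 = PySem.List.pyGetD [3, 3, 1, 1, 2, 2, 4, 4, 5, 5] (PySem.Int.mod i 10) 0 then r.2.2 + 1 else r.2.2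
        (r0, r1, r2))
      (0, 0, 0)
    = (cntN [1, 2, 3, 4, 5] xs m, cntN [2, 1, 2, 3, 2, 4, 2, 5] xs m, cntN [3, 3, 1, 1, 2, 2, 4, 4, 5, 5] xs m) := by
  induction m with
  | zero => simp [PySem.List.pyRange, cntN]
  | succ m ih =>
    have hcast : ((m + 1 : Nat) : Int) = (m : Int) + 1 := by push_cast; ring
    rw [hcast, PySem.List.pyRange_one_succ_right (by positivity), List.foldl_append, ih]
    simp only [List.foldl_cons, List.foldl_nil]
    have h5 : PySem.Int.mod (m : Int) 5 = ((m % 5 : Nat) : Int) := by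
      exact_mod_cast PySem.Int.mod_natCast m 5
    have h8 : PySem.Int.mod (m : Int) 8 = ((m % 8 : Nat) : Int) := by
      exact_mod_cast PySem.Int.mod_natCast m 8
    have h10 : PySem.Int.mod (m : Int) 10 = ((m % 10 : Nat) : Int) := by
      exact_mod_cast PySem.Int.mod_natCast m 10
    have l5 : ([1, 2, 3, 4, 5] : List Int).length = 5 := rfl
    have l8 : ([2, 1, 2, 3, 2, 4, 2, 5] : List Int).length = 8 := rfl
    have l10 : ([3, 3, 1, 1, 2, 2, 4, 4, 5, 5] : List Int).length = 10 := rfl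
    unfold cntN
    rw [List.range_succ, List.countP_append, List.countP_append, List.countP_append]
    simp only [h5, h8, h10, PySem.List.pyGetD_natCast, l5, l8, l10,
      List.countP_cons, List.countP_nil, Nat.zero_add, Prod.mk.injEq]
    exact ⟨step_count _ _ _, step_count _ _ _, step_count _ _ _⟩

-- the shared tail: pick max and collect 1-based indices of the maximal scores
theorem finalStage (c1 c2 c3 : Int) :
    (PySem.List.pyRange 0 3 1).foldl
      (fun ans i =>
        if (if i = 0 then c1 else if i = 1 then c2 else c3) = max (max c1 c2) c3 then ans ++ [i + 1] else ans)
      []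
    = (PySem.List.enumerate [c1, c2, c3]).foldl
        (fun acc is => if is.2 = (PySem.List.max? [c1, c2, c3] (fun x => x)).getD 0 then acc ++ [is.1 + 1] else acc)
        [] := by
  have hrng : PySem.List.pyRange 0 3 1 = [0, 1, 2] := by decide
  rw [hrng, PySem.List.max?_id_cons]
  simp only [PySem.List.enumerate, Option.getD_some, List.foldl_cons, List.foldl_nil]
  norm_num

-- ===== VERDICT (by name: the statement is the Claim_ definition above) =====
set_option maxHeartbeats 1000000 in
theorem solution_spec : Claim_equal_solution := by
  intro answers _
  show solution answers = solution_alt answers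
  unfold solution solution_alt
  simp only [List.map_cons, List.map_nil]
  rw [loopA answers answers.length]
  have e1 : altScore [1, 2, 3, 4, 5] answers = cntN [1, 2, 3, 4, 5] answers answers.length :=
    altScore_eq_cntN _ _ (by simp)
  have e2 : altScore [2, 1, 2, 3, 2, 4, 2, 5] answers = cntN [2, 1, 2, 3, 2, 4, 2, 5] answers answers.length :=
    altScore_eq_cntN _ _ (by simp)
  have e3 : altScore [3, 3, 1, 1, 2, 2, 4, 4, 5, 5] answers = cntN [3, 3, 1, 1, 2, 2, 4, 4, 5, 5] answers answers.length :=
    altScore_eq_cntN _ _ (by simp)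
  simp only [e1, e2, e3]
  exact finalStage _ _ _
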